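-- pv_equiv track=rewrite | github.com/dong11hyun/PS_problem_solving | programmers/level 1/대충만든자판.py | solution
-- ===== SOURCE A (Python) =====
-- def solution(keymap, targets):
--     min_cost_map = {}
--     for key_string in keymap:
--         for i, char in enumerate(key_string):
--             cost = i + 1
--             if char not in min_cost_map or cost < min_cost_map[char]:
--                 min_cost_map[char] = cost
--     result=[]
--     for target in targets:
--         sum = 0
--         for char in target:
--             if char not in min_cost_map:
--                 sum = -1
--                 break
--             sum += min_cost_map[char]
--         result.append(sum)
--     return result
-- ===== SOURCE B (Python) =====
-- def solution(keymap, targets):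
--     def key_cost(ch):
--         # min index+1 over keymap strings containing ch; None if absent everywhere
--         return min((s.index(ch) + 1 for s in keymap if ch in s), default=None)
--
--     def target_cost(t):
--         total = 0
--         for ch in t:
--             c = key_cost(ch)
--             if c is None:
--                 return -1
--             total += c
--         return total
--
--     return [target_cost(t) for t in targets]
-- ===== Notes on version B (the rewrite author's own statement) =====
-- stated objective: alternative
-- what changed: Drops A's precomputed per-character min-cost dict: B computes each character's cost on demand by scanning the keymap strings directly (min of first-occurrence index + 1, None if absent), and builds the result with a per-target helper and a list comprehension instead of an accumulator list with break.
import Mathlib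
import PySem

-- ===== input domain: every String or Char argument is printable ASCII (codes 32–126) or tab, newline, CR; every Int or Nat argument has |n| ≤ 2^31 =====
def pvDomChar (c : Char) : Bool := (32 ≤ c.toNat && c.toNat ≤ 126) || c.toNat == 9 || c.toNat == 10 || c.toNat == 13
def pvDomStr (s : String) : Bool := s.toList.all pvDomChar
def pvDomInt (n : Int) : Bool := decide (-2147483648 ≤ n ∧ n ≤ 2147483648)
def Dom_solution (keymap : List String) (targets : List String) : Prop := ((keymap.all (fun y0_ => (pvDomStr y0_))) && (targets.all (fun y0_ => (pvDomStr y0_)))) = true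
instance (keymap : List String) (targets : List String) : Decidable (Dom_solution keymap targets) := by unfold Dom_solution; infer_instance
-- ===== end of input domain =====

-- B computes each character's cost by scanning the keymap directly instead of precomputing A's min-cost dict; objective: alternative.


-- ===== PORT A =====
-- one enumerate step of A's dict-building inner loop
def pvStepA (m : PySem.Dict Char Int) (p : Int × Char) : PySem.Dict Char Int :=
  -- cost = i + 1; update when char is absent or cost < current value
  if (match m.get? p.2 with | none => true | some v => decide (p.1 + 1 < v)) then
    m.insert p.2 (p.1 + 1)
  else m

def pvBuild (keymap : List String) : PySem.Dict Char Int :=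
  keymap.foldl (fun m ks => (PySem.List.enumerate ks.toList).foldl pvStepA m) PySem.Dict.empty

-- A's inner target loop with `break`: stops with -1 on a missing char
def pvSumA (m : PySem.Dict Char Int) : List Char → Int → Int
  | [], s => s
  | c :: rest, s =>
    match m.get? c with
    | none => -1
    | some v => pvSumA m rest (s + v)

def solution (keymap : List String) (targets : List String) : List Int :=
  let m := pvBuild keymap
  targets.foldl (fun res t => res ++ [pvSumA m t.toList 0]) []

-- ===== PORT B =====
-- min(s.index(ch)+1 for s in keymap if ch in s) with default None, as a fold
def pvCost (keymap : List String) (c : Char) : Option Int :=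
  keymap.foldl (fun best s =>
    match PySem.List.index? s.toList c with
    | none => best
    | some i =>
      match best with
      | none => some ((i : Int) + 1)
      | some b => some (min b ((i : Int) + 1))) none

-- B's target_cost helper: early return -1 on a missing char
def pvSumB (keymap : List String) : List Char → Int → Int
  | [], s => s
  | c :: rest, s =>
    match pvCost keymap c with
    | none => -1
    | some v => pvSumB keymap rest (s + v)

def solution_alt (keymap : List String) (targets : List String) : List Int :=
  targets.map (fun t => pvSumB keymap t.toList 0)

-- ===== PRECONDITION & SPEC =====
def Spec_solution (keymap : List String) (targets : List String) (out : List Int) : Prop := out = solution_alt keymap targets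
instance (keymap : List String) (targets : List String) (out : List Int) : Decidable (Spec_solution keymap targets out) := by unfold Spec_solution; infer_instance

-- ===== CLAIM (what is proved, stated in full; the proofs are below) =====
def Claim_equal_solution : Prop := ∀ (keymap : List String) (targets : List String), Dom_solution keymap targets → Spec_solution keymap targets (solution keymap targets)

-- ===== LEMMAS AND PROOFS =====

-- the value A's update rule leaves at key c after seeing one occurrence of c at cost `cost`
def pvUpd (o : Option Int) (cost : Int) : Int :=
  match o with | none => cost | some b => min b cost

-- A's inner loop over one keymap string, seen through get? c
lemma pvInner (c : Char) (l : List Char) :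
    ∀ (k : Int) (d : PySem.Dict Char Int),
      ((PySem.List.enumerate l k).foldl pvStepA d).get? c =
        match PySem.List.index? l c with
        | none => d.get? c
        | some i => some (pvUpd (d.get? c) (k + (i : Int) + 1)) := by
  induction l with
  | nil => intro k d; simp [PySem.List.enumerate_nil, PySem.List.index?_eq_idxOf?, List.idxOf?]
  | cons x xs ih =>
    intro k d
    rw [PySem.List.enumerate_cons, List.foldl_cons, ih (k + 1) (pvStepA d (k, x))]
    by_cases hx : x = c
    · subst hx
      have hd' : (pvStepA d (k, x)).get? x = some (pvUpd (d.get? x) (k + 1)) := by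
        unfold pvStepA pvUpd
        rcases h : d.get? x with _ | b
        · simp [PySem.Dict.get?_insert_self]
        · by_cases hlt : k + 1 < b
          · have hm : min b (k + 1) = k + 1 := by omega
            simp [hlt, PySem.Dict.get?_insert_self, hm]
          · have hm : min b (k + 1) = b := by omega
            simp [hlt, hm, h]
      rw [hd', PySem.List.index?_cons_self]
      cases PySem.List.index? xs x with
      | none => simp
      | some j =>
        simp only [pvUpd]
        congr 1
        rcases d.get? x with _ | b <;> simp <;> omega
    · have hne : c ≠ x := fun h => hx h.symm
      have hd' : (pvStepA d (k, x)).get? c = d.get? c := by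
        unfold pvStepA
        split
        · exact PySem.Dict.get?_insert_of_ne _ _ hne
        · split
          · exact PySem.Dict.get?_insert_of_ne _ _ hne
          · rfl
      rw [hd', PySem.List.index?_cons_of_ne xs hx]
      cases PySem.List.index? xs c with
      | none => rfl
      | some j =>
        simp only [Option.map_some]
        congr 2
        push_cast
        ring

-- A's whole dict build, seen through get? c, equals B's direct keymap scan
lemma pvBuild_get?_eq (keymap : List String) (c : Char) :
    (pvBuild keymap).get? c = pvCost keymap c := by
  unfold pvBuild pvCost
  suffices h : ∀ (km : List String) (d : PySem.Dict Char Int) (best : Option Int),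
      d.get? c = best →
      (km.foldl (fun m ks => (PySem.List.enumerate ks.toList).foldl pvStepA m) d).get? c =
      km.foldl (fun best s =>
        match PySem.List.index? s.toList c with
        | none => best
        | some i =>
          match best with
          | none => some ((i : Int) + 1)
          | some b => some (min b ((i : Int) + 1))) best by
    exact h keymap PySem.Dict.empty none rfl
  intro km
  induction km with
  | nil => intro d best h; simpa using h
  | cons s rest ih =>
    intro d best h
    simp only [List.foldl_cons]
    apply ih
    rw [pvInner c s.toList 0 d, h]
    rcases PySem.List.index? s.toList c with _ | i
    · rfl
    · simp only [pvUpd, zero_add]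
      rcases best with _ | b <;> rfl

lemma pvSum_eq (keymap : List String) (l : List Char) :
    ∀ s : Int, pvSumA (pvBuild keymap) l s = pvSumB keymap l s := by
  induction l with
  | nil => intro s; rfl
  | cons c rest ih =>
    intro s
    unfold pvSumA pvSumB
    rw [pvBuild_get?_eq keymap c]
    rcases pvCost keymap c with _ | v
    · rfl
    · exact ih (s + v)

-- ===== VERDICT (by name: the statement is the Claim_ definition above) =====
theorem solution_spec : Claim_equal_solution := by
  intro keymap targets _
  unfold Spec_solution solution solution_alt
  rw [PySem.List.foldl_append_singleton_eq_map]
  exact List.map_congr_left (fun t _ => pvSum_eq keymap t.toList 0)
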